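-- pv_equiv track=rewrite | github.com/mwojnars/hypertag | core/dom.py | get_indent
-- ===== SOURCE A (Python) =====
-- def get_indent(text):
--     """
--     Retrieve the longest indentation string fully composed of whitespace
--     that is shared by ALL non-empty lines in `text`, including the 1st line (if it contains a non-whitespace).
--     """
--     lines = text.split('\n')
--     lines = list(filter(None, [l if l.strip() else '' for l in lines]))          # filter out empty lines
--     if not lines: return ''
--
--     for i, column in enumerate(zip(*lines)):        # zip() only eats up as many characters as the shortest line
--         if not column[0].isspace() or min(column) != max(column):
--             return lines[0][:i]
--     else:
--         size = min(map(len, lines))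
--         return lines[0][:size]                      # when all lines are prefixes of each other take the shortest one
-- ===== SOURCE B (Python) =====
-- def _ws_prefix(s):
--     out = []
--     for ch in s:
--         if not ch.isspace():
--             break
--         out.append(ch)
--     return ''.join(out)
--
-- def _common_prefix(p, l):
--     out = []
--     for a, b in zip(p, l):
--         if a != b:
--             break
--         out.append(a)
--     return ''.join(out)
--
-- def get_indent(text):
--     lines = [l for l in text.split('\n') if l.strip()]
--     if not lines:
--         return ''
--     pref = _ws_prefix(lines[0])
--     for l in lines[1:]:
--         pref = _common_prefix(pref, l)
--     return pref
-- ===== Notes on version B (the rewrite author's own statement) =====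
-- stated objective: simpler
-- what changed: Replaces A's column-wise zip(*lines) transpose scan (with per-column min/max equality tests) by a single row-wise fold: start from the whitespace prefix of the first line and shrink it by common-prefix against each further line.
import Mathlib
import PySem

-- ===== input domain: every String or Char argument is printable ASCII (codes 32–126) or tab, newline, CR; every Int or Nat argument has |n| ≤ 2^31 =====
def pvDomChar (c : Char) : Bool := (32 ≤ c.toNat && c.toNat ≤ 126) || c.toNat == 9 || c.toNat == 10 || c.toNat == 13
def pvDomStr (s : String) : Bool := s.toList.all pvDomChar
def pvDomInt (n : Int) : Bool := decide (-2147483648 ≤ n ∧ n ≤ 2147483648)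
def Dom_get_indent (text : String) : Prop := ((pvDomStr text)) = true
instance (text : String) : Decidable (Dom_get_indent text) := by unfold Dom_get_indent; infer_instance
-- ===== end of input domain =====

-- B replaces A's column-wise zip(*lines) scan by a row-wise fold that shrinks a running
-- common whitespace prefix; same return value, objective: simpler.

-- ===== PORT A =====
-- A's per-column test `not column[0].isspace() or min(column) != max(column)`
-- (column[0] ported as col.headD ' '; the column is never empty when A evaluates this)
def badCol (col : List Char) : Bool :=
  !PySem.Chars.isspace (col.headD ' ')
    || (PySem.List.min? col (fun x => x) != PySem.List.max? col (fun x => x))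

-- zip(*lines): the list of columns, cut at the shortest line (exact for the nonempty
-- `ls` of nonempty lines A reaches it with; the ' ' default of getD is never used there)
def pyZipAll (ls : List (List Char)) : List (List Char) :=
  (List.range (((ls.map (fun l => l.length)).min?).getD 0)).map
    (fun j => ls.map (fun l => l.getD j ' '))

-- the for/else loop over enumerate(zip(*lines)); the [] case is Python's `else` branch
def getIndentLoopA (lines : List (List Char)) : List (Int × List Char) → List Char
  | [] =>
      PySem.List.slice (lines.headD []) none
        (some ((PySem.List.min? (lines.map (fun l => (l.length : Int))) (fun x => x)).getD 0))
  | (i, col) :: rest =>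
      if badCol col then
        PySem.List.slice (lines.headD []) none (some i)
      else getIndentLoopA lines rest

def get_indent (text : String) : String :=
  let lines := ((PySem.Chars.splitOn text.toList ['\n']).map
      (fun l => if PySem.Chars.strip l ≠ [] then l else [])).filter (fun l => l ≠ [])
  if lines = [] then ""
  else String.ofList (getIndentLoopA lines (PySem.List.enumerate (pyZipAll lines) 0))

-- ===== PORT B =====
-- _ws_prefix: longest all-whitespace prefix
def wsPrefixB : List Char → List Char
  | [] => []
  | c :: t => if PySem.Chars.isspace c then c :: wsPrefixB t else []

-- _common_prefix: longest common prefix of two lists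
def commonPrefixB : List Char → List Char → List Char
  | [], _ => []
  | _ :: _, [] => []
  | a :: p, b :: l => if a = b then a :: commonPrefixB p l else []

def get_indent_alt (text : String) : String :=
  let lines := (PySem.Chars.splitOn text.toList ['\n']).filter
      (fun l => PySem.Chars.strip l ≠ [])
  match lines with
  | [] => ""
  | first :: rest => String.ofList (rest.foldl commonPrefixB (wsPrefixB first))

-- ===== PRECONDITION & SPEC =====
def Spec_get_indent (text : String) (out : String) : Prop := out = get_indent_alt text
instance (text : String) (out : String) : Decidable (Spec_get_indent text out) := by unfold Spec_get_indent; infer_instance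

-- ===== CLAIM (what is proved, stated in full; the proofs are below) =====
def Claim_equal_get_indent : Prop := ∀ (text : String), Dom_get_indent text → Spec_get_indent text (get_indent text)

-- ===== LEMMAS AND PROOFS =====

-- ---- the two preprocessings produce the same line list ----

theorem strip_nil : PySem.Chars.strip ([] : List Char) = [] := by decide

theorem lines_eq (L : List (List Char)) :
    ((L.map (fun l => if PySem.Chars.strip l ≠ [] then l else [])).filter (fun l => l ≠ []))
      = L.filter (fun l => PySem.Chars.strip l ≠ []) := by
  induction L with
  | nil => rfl
  | cons l L ih =>
    simp only [ne_eq, ite_not, decide_not] at ih ⊢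
    by_cases h : PySem.Chars.strip l = []
    · rw [List.map_cons, if_pos h, List.filter_cons, List.filter_cons]
      simpa [h] using ih
    · have hl : l ≠ [] := by rintro rfl; exact h strip_nil
      rw [List.map_cons, if_neg h, List.filter_cons, List.filter_cons]
      simpa [h, hl] using ih

-- ---- characterising A's column test ----

theorem badCol_false_iff (col : List Char) :
    badCol col = false ↔ PySem.Chars.isspace (col.headD ' ') = true ∧
      PySem.List.min? col (fun x => x) = PySem.List.max? col (fun x => x) := by
  simp [badCol]

theorem notBad_allEq (col : List Char) (h : badCol col = false) :
    ∀ x ∈ col, ∀ y ∈ col, x = y := by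
  rw [badCol_false_iff] at h
  intro x hx y hy
  cases hmin : PySem.List.min? col (fun c => c) with
  | none => rw [PySem.List.min?_eq_none_iff] at hmin; subst hmin; simp at hx
  | some m =>
    have hmax : PySem.List.max? col (fun c => c) = some m := by rw [← h.2, hmin]
    have h1 := PySem.List.min?_isMin hmin x hx
    have h2 := PySem.List.max?_isMax hmax x hx
    have h3 := PySem.List.min?_isMin hmin y hy
    have h4 := PySem.List.max?_isMax hmax y hy
    rw [le_antisymm h2 h1, le_antisymm h4 h3]

theorem constCol_notBad (col : List Char) (c : Char) (hc : col ≠ [])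
    (hall : ∀ x ∈ col, x = c) (hws : PySem.Chars.isspace c = true) :
    badCol col = false := by
  rw [badCol_false_iff]
  constructor
  · cases col with
    | nil => exact absurd rfl hc
    | cons a t => simpa using (hall a (by simp)) ▸ hws
  · cases hmin : PySem.List.min? col (fun x => x) with
    | none => rw [PySem.List.min?_eq_none_iff] at hmin; exact absurd hmin hc
    | some m =>
      cases hmax : PySem.List.max? col (fun x => x) with
      | none => rw [PySem.List.max?_eq_none_iff] at hmax; exact absurd hmax hc
      | some M =>
        have : m = c := hall m (PySem.List.min?_mem hmin)
        have : M = c := hall M (PySem.List.max?_mem hmax)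
        simp_all

-- ---- A's loop finds the first bad column ----

def firstBad : List (List Char) → Option Nat
  | [] => none
  | c :: cs => if badCol c then some 0 else (firstBad cs).map (· + 1)

theorem loopA_eq (lines : List (List Char)) (cs : List (List Char)) :
    ∀ (s : Int),
      getIndentLoopA lines (PySem.List.enumerate cs s) =
        match firstBad cs with
        | some j => PySem.List.slice (lines.headD []) none (some (s + j))
        | none => PySem.List.slice (lines.headD []) none
            (some ((PySem.List.min? (lines.map (fun l => (l.length : Int))) (fun x => x)).getD 0)) := by
  induction cs with
  | nil => intro s; simp [PySem.List.enumerate, getIndentLoopA, firstBad]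
  | cons c cs ih =>
    intro s
    rw [PySem.List.enumerate_cons]
    by_cases hb : badCol c
    · simp [getIndentLoopA, firstBad, hb]
    · simp only [Bool.not_eq_true] at hb
      rw [show getIndentLoopA lines ((s, c) :: PySem.List.enumerate cs (s + 1))
          = getIndentLoopA lines (PySem.List.enumerate cs (s + 1)) by
        simp [getIndentLoopA, hb]]
      rw [ih (s + 1)]
      rw [show firstBad (c :: cs) = (firstBad cs).map (· + 1) by simp [firstBad, hb]]
      cases hfb : firstBad cs with
      | none => simp
      | some j => simp only [Option.map_some]; congr 2; push_cast; ring

theorem firstBad_none (cs : List (List Char)) (h : firstBad cs = none) :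
    ∀ j (hj : j < cs.length), badCol cs[j] = false := by
  induction cs with
  | nil => intro j hj; simp at hj
  | cons c cs ih =>
    intro j hj
    by_cases hb : badCol c
    · simp [firstBad, hb] at h
    · simp only [Bool.not_eq_true] at hb
      rw [show firstBad (c :: cs) = (firstBad cs).map (· + 1) by simp [firstBad, hb]] at h
      cases j with
      | zero => simpa using hb
      | succ j => exact ih (by simpa using h) j (by simpa using hj)

theorem firstBad_some (cs : List (List Char)) (k : Nat) (h : firstBad cs = some k) :
    ∃ hk : k < cs.length, badCol cs[k] = true ∧
      ∀ j, j < k → ∀ (hj : j < cs.length), badCol cs[j] = false := by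
  induction cs generalizing k with
  | nil => simp [firstBad] at h
  | cons c cs ih =>
    by_cases hb : badCol c
    · rw [show firstBad (c :: cs) = some 0 by simp [firstBad, hb]] at h
      obtain rfl : k = 0 := by simpa using h.symm
      exact ⟨by simp, by simpa using hb, by omega⟩
    · simp only [Bool.not_eq_true] at hb
      rw [show firstBad (c :: cs) = (firstBad cs).map (· + 1) by simp [firstBad, hb]] at h
      simp only [Option.map_eq_some_iff] at h
      obtain ⟨k', hk', rfl⟩ := h
      obtain ⟨hlt, hbad, hmin⟩ := ih k' hk'
      refine ⟨by simpa using hlt, by simpa using hbad, ?_⟩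
      intro j hj hjl
      cases j with
      | zero => simpa using hb
      | succ j => exact hmin j (by omega) (by simpa using hjl)

-- ---- characterising B's fold ----

theorem wsPrefix_prefix (s : List Char) : wsPrefixB s <+: s := by
  induction s with
  | nil => simp [wsPrefixB]
  | cons c t ih =>
    by_cases h : PySem.Chars.isspace c
    · simpa [wsPrefixB, h, List.cons_prefix_cons] using ih
    · simp [wsPrefixB, h]

theorem wsPrefix_ws (s : List Char) : ∀ c ∈ wsPrefixB s, PySem.Chars.isspace c = true := by
  induction s with
  | nil => simp [wsPrefixB]
  | cons c t ih =>
    by_cases h : PySem.Chars.isspace c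
    · intro d hd
      rw [wsPrefixB, if_pos h] at hd
      rcases List.mem_cons.mp hd with rfl | hd
      · exact h
      · exact ih d hd
    · simp [wsPrefixB, h]

theorem wsPrefix_max (p : List Char) : ∀ s, p <+: s →
    (∀ c ∈ p, PySem.Chars.isspace c = true) → p <+: wsPrefixB s := by
  induction p with
  | nil => simp
  | cons a p ih =>
    intro s hp hws
    cases s with
    | nil => simp at hp
    | cons b t =>
      rw [List.cons_prefix_cons] at hp
      obtain ⟨rfl, hp⟩ := hp
      have ha : PySem.Chars.isspace a = true := hws a (by simp)
      rw [wsPrefixB, if_pos ha, List.cons_prefix_cons]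
      exact ⟨rfl, ih t hp (fun c hc => hws c (by simp [hc]))⟩

theorem cp_prefix_left : ∀ p l, commonPrefixB p l <+: p := by
  intro p
  induction p with
  | nil => intro l; simp [commonPrefixB]
  | cons a p ih =>
    intro l
    cases l with
    | nil => simp [commonPrefixB]
    | cons b l =>
      by_cases h : a = b
      · rw [commonPrefixB, if_pos h, List.cons_prefix_cons]; exact ⟨rfl, ih l⟩
      · simp [commonPrefixB, h]

theorem cp_prefix_right : ∀ p l, commonPrefixB p l <+: l := by
  intro p
  induction p with
  | nil => intro l; simp [commonPrefixB]
  | cons a p ih =>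
    intro l
    cases l with
    | nil => simp [commonPrefixB]
    | cons b l =>
      by_cases h : a = b
      · subst h; rw [commonPrefixB, if_pos rfl, List.cons_prefix_cons]; exact ⟨rfl, ih l⟩
      · simp [commonPrefixB, h]

theorem cp_max (q : List Char) : ∀ p l, q <+: p → q <+: l → q <+: commonPrefixB p l := by
  induction q with
  | nil => simp
  | cons c q ih =>
    intro p l hp hl
    cases p with
    | nil => simp at hp
    | cons a p =>
      cases l with
      | nil => simp at hl
      | cons b l =>
        rw [List.cons_prefix_cons] at hp hl
        obtain ⟨rfl, hp⟩ := hp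
        obtain ⟨rfl, hl⟩ := hl
        rw [commonPrefixB, if_pos rfl, List.cons_prefix_cons]
        exact ⟨rfl, ih p l hp hl⟩

theorem foldl_cp_spec (rest : List (List Char)) : ∀ acc : List Char,
    (rest.foldl commonPrefixB acc <+: acc) ∧
    (∀ l ∈ rest, rest.foldl commonPrefixB acc <+: l) ∧
    (∀ p, p <+: acc → (∀ l ∈ rest, p <+: l) → p <+: rest.foldl commonPrefixB acc) := by
  induction rest with
  | nil => intro acc; refine ⟨by simp, by simp, by simp⟩
  | cons l rest ih =>
    intro acc
    rw [List.foldl_cons]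
    obtain ⟨h1, h2, h3⟩ := ih (commonPrefixB acc l)
    refine ⟨h1.trans (cp_prefix_left acc l), ?_, ?_⟩
    · intro l' hl'
      rcases List.mem_cons.mp hl' with rfl | hl'
      · exact h1.trans (cp_prefix_right acc l')
      · exact h2 l' hl'
    · intro p hacc hall
      exact h3 p (cp_max p acc l hacc (hall l (by simp))) (fun l' hl' => hall l' (by simp [hl']))

-- ---- both sides are THE maximal common whitespace prefix ----

theorem take_eq_fold (first : List Char) (rest : List (List Char)) (idx : Nat)
    (hws_a : ∀ c ∈ first.take idx, PySem.Chars.isspace c = true)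
    (hpre_a : ∀ l ∈ first :: rest, first.take idx <+: l)
    (Hstop : ∀ p : List Char, (∀ c ∈ p, PySem.Chars.isspace c = true) →
      (∀ l ∈ first :: rest, p <+: l) → p.length ≤ idx) :
    first.take idx = rest.foldl commonPrefixB (wsPrefixB first) := by
  obtain ⟨hb1, hb2, hb3⟩ := foldl_cp_spec rest (wsPrefixB first)
  set a := first.take idx with ha
  set b := rest.foldl commonPrefixB (wsPrefixB first) with hbdef
  have hbfirst : b <+: first := hb1.trans (wsPrefix_prefix first)
  have hws_b : ∀ c ∈ b, PySem.Chars.isspace c = true :=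
    fun c hc => wsPrefix_ws first c (hb1.subset hc)
  have hpre_b : ∀ l ∈ first :: rest, b <+: l := by
    intro l hl
    rcases List.mem_cons.mp hl with rfl | hl
    · exact hbfirst
    · exact hb2 l hl
  have hab : a <+: b :=
    hb3 a (wsPrefix_max a first (List.take_prefix idx first) hws_a)
      (fun l hl => hpre_a l (List.mem_cons_of_mem _ hl))
  have hba : b <+: a := by
    rw [ha]
    exact List.prefix_take_iff.mpr ⟨hbfirst, Hstop b hws_b hpre_b⟩
  exact hab.eq_of_length (le_antisymm hab.length_le hba.length_le)

theorem minNat_spec (first : List Char) (rest : List (List Char)) :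
    ∃ mN : Nat, ((first :: rest).map (fun l => l.length)).min? = some mN ∧
      (∃ l0 ∈ first :: rest, l0.length = mN) ∧ (∀ l ∈ first :: rest, mN ≤ l.length) := by
  cases hm : ((first :: rest).map (fun l => l.length)).min? with
  | none => rw [List.min?_eq_none_iff] at hm; simp at hm
  | some mN =>
    rw [List.min?_eq_some_iff] at hm
    obtain ⟨hmem, hle⟩ := hm
    refine ⟨mN, rfl, ?_, ?_⟩
    · obtain ⟨l0, hl0, he⟩ := List.mem_map.mp hmem
      exact ⟨l0, hl0, he⟩
    · intro l hl
      exact hle _ (List.mem_map.mpr ⟨l, hl, rfl⟩)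

theorem minInt_eq (first : List Char) (rest : List (List Char)) (mN : Nat)
    (hmem : ∃ l0 ∈ first :: rest, l0.length = mN)
    (hle : ∀ l ∈ first :: rest, mN ≤ l.length) :
    PySem.List.min? ((first :: rest).map (fun l => (l.length : Int))) (fun x => x)
      = some (mN : Int) := by
  cases hm : PySem.List.min? ((first :: rest).map (fun l => (l.length : Int))) (fun x => x) with
  | none => rw [PySem.List.min?_eq_none_iff] at hm; simp at hm
  | some M =>
    have hMmem := PySem.List.min?_mem hm
    have hMmin := PySem.List.min?_isMin hm
    obtain ⟨l1, hl1, hMe⟩ := List.mem_map.mp hMmem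
    obtain ⟨l0, hl0, hl0e⟩ := hmem
    have h1 : M ≤ (mN : Int) := by
      have := hMmin ((l0.length : Int)) (List.mem_map.mpr ⟨l0, hl0, rfl⟩)
      simpa [hl0e] using this
    have h2 : (mN : Int) ≤ M := by
      rw [← hMe]
      exact_mod_cast hle l1 hl1
    rw [le_antisymm h1 h2]

theorem main_eq (first : List Char) (rest : List (List Char)) :
    getIndentLoopA (first :: rest) (PySem.List.enumerate (pyZipAll (first :: rest)) 0)
      = rest.foldl commonPrefixB (wsPrefixB first) := by
  obtain ⟨mN, hmN, hmem, hle⟩ := minNat_spec first rest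
  have hfirstlen : mN ≤ first.length := hle first (by simp)
  have hcolslen : (pyZipAll (first :: rest)).length = mN := by
    simp only [pyZipAll, hmN, Option.getD_some, List.length_map, List.length_range]
  have hcol : ∀ (j : Nat) (hj : j < (pyZipAll (first :: rest)).length),
      (pyZipAll (first :: rest))[j] = (first :: rest).map (fun l => l.getD j ' ') := by
    intro j hj
    simp only [pyZipAll, hmN, Option.getD_some, List.getElem_map, List.getElem_range]
  have goodFacts : ∀ idx : Nat, idx ≤ mN →
      (∀ (j : Nat) (hj : j < (pyZipAll (first :: rest)).length), j < idx →
        badCol (pyZipAll (first :: rest))[j] = false) →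
      (∀ c ∈ first.take idx, PySem.Chars.isspace c = true) ∧
      (∀ l ∈ first :: rest, first.take idx <+: l) := by
    intro idx hidx hgood
    have key : ∀ (j : Nat), j < idx → ∀ l ∈ first :: rest, l.getD j ' ' = first.getD j ' ' ∧
        PySem.Chars.isspace (first.getD j ' ') = true := by
      intro j hj l hl
      have hjc : j < (pyZipAll (first :: rest)).length := by omega
      have hbad := hgood j hjc hj
      rw [hcol j hjc] at hbad
      constructor
      · exact notBad_allEq _ hbad _ (List.mem_map.mpr ⟨l, hl, rfl⟩) _
          (List.mem_map.mpr ⟨first, by simp, rfl⟩)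
      · exact ((badCol_false_iff _).mp hbad).1
    constructor
    · intro c hc
      obtain ⟨j, hj, hje⟩ := List.mem_iff_getElem.mp hc
      have hj' : j < idx := by simp at hj; omega
      have hjf : j < first.length := by omega
      have := (key j hj' first (by simp)).2
      rw [List.getD_eq_getElem first ' ' hjf] at this
      rw [← hje, List.getElem_take]
      exact this
    · intro l hl
      have hll : idx ≤ l.length := le_trans hidx (hle l hl)
      have : l.take idx = first.take idx := by
        apply List.ext_getElem
        · simp; omega
        · intro j h1 h2
          have hj : j < idx := by simp at h1; omega
          have he := (key j hj l hl).1
          rw [List.getD_eq_getElem l ' ' (by omega),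
            List.getD_eq_getElem first ' ' (by omega)] at he
          simpa [List.getElem_take] using he
      rw [← this]
      exact List.take_prefix idx l
  have plen_le_mN : ∀ p : List Char, (∀ l ∈ first :: rest, p <+: l) → p.length ≤ mN := by
    intro p hp
    obtain ⟨l0, hl0, he⟩ := hmem
    exact he ▸ (hp l0 hl0).length_le
  rw [loopA_eq]
  cases hfb : firstBad (pyZipAll (first :: rest)) with
  | none =>
    have hgood := firstBad_none _ hfb
    obtain ⟨hws_a, hpre_a⟩ := goodFacts mN le_rfl (fun j hj _ => hgood j hj)
    have : PySem.List.slice ((first :: rest).headD []) none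
        (some ((PySem.List.min? ((first :: rest).map (fun l => (l.length : Int)))
          (fun x => x)).getD 0)) = first.take mN := by
      rw [minInt_eq first rest mN hmem hle]
      simp [PySem.List.slice_to_natCast first mN]
    rw [this]
    exact take_eq_fold first rest mN hws_a hpre_a (fun p _ hpre => plen_le_mN p hpre)
  | some k =>
    obtain ⟨hk, hbadk, hgood⟩ := firstBad_some _ k hfb
    have hkmN : k ≤ mN := by omega
    obtain ⟨hws_a, hpre_a⟩ := goodFacts k hkmN (fun j hj hjk => hgood j hjk hj)
    have : PySem.List.slice ((first :: rest).headD []) none (some ((0 : Int) + k))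
        = first.take k := by
      simp [PySem.List.slice_to_natCast first k]
    show PySem.List.slice ((first :: rest).headD []) none (some ((0:Int) + k))
      = List.foldl commonPrefixB (wsPrefixB first) rest
    rw [this]
    apply take_eq_fold first rest k hws_a hpre_a
    intro p hws hpre
    by_contra hgt
    push Not at hgt
    have hpk : k < p.length := hgt
    have hcolk := hcol k hk
    have : badCol (pyZipAll (first :: rest))[k] = false := by
      rw [hcolk]
      apply constCol_notBad _ (p[k]'hpk)
      · simp
      · intro x hx
        obtain ⟨l, hl, rfl⟩ := List.mem_map.mp hx
        have hkl : k < l.length := by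
          have h1 := hle l hl
          omega
        rw [List.getD_eq_getElem l ' ' hkl]
        exact (List.IsPrefix.getElem (hpre l hl) hpk).symm ▸ rfl
      · exact hws _ (List.mem_iff_getElem.mpr ⟨k, hpk, rfl⟩)
    rw [this] at hbadk
    exact Bool.false_ne_true hbadk

-- ===== VERDICT (by name: the statement is the Claim_ definition above) =====
theorem get_indent_spec : Claim_equal_get_indent := by
  intro text _
  show get_indent text = get_indent_alt text
  unfold get_indent get_indent_alt
  rw [lines_eq]
  cases hL : (PySem.Chars.splitOn text.toList ['\n']).filter
      (fun l => PySem.Chars.strip l ≠ []) with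
  | nil => simp
  | cons first rest => simp [main_eq]
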